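-- pv_equiv track=rewrite | github.com/Glitch31415/sevenkewp-sandbox | scripts/convert_map.py | ents_match
-- ===== SOURCE A (Python) =====
-- def ents_match(d1, d2, path=""):
-- 	if len(d1) != len(d2):
-- 		return False
--
-- 	for idx, ent in enumerate(d1):
-- 		e1 = d1[idx]
-- 		e2 = d2[idx]
--
-- 		for k in e1.keys():
-- 			if k in e2:
-- 				if e1[k] != e2[k]:
-- 					return False
-- 			else:
-- 				return False
-- 		for k in e2.keys():
-- 			if k not in e1:
-- 				return False
-- 	return True
-- ===== SOURCE B (Python) =====
-- def ents_match(d1, d2, path=""):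
--     if len(d1) != len(d2):
--         return False
--     f1 = {(i, k): v for i, e in enumerate(d1) for k, v in e.items()}
--     f2 = {(i, k): v for i, e in enumerate(d2) for k, v in e.items()}
--     if f1.keys() != f2.keys():
--         return False
--     for p in f1:
--         if f1[p] != f2[p]:
--             return False
--     return True
-- ===== Notes on version B (the rewrite author's own statement) =====
-- stated objective: alternative
-- what changed: Instead of comparing the lists dict-by-dict with two directional key-membership scans per pair, B flattens each list into a single dict keyed by (index, key) and compares the two flat dicts once: one key-view comparison plus one value loop using != on individual values.
import Mathlib
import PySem

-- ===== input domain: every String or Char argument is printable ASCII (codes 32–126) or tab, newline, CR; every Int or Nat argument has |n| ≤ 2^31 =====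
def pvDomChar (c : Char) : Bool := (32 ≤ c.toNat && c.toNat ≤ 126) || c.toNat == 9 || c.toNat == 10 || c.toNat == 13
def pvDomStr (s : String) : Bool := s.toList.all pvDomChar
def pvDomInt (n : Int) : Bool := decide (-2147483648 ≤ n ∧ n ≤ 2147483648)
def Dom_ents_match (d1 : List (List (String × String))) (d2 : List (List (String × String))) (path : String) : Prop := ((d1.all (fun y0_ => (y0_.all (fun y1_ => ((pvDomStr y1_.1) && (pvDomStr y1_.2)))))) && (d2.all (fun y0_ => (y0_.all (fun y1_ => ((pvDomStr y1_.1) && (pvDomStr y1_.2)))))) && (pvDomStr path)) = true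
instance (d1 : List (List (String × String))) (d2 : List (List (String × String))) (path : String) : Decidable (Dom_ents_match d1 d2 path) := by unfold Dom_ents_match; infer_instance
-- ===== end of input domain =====

-- B replaces A's nested per-pair comparison (two directional key-membership scans per dict pair)
-- by flattening each list into ONE dict keyed by (index, key) and comparing the two flat dicts
-- once: one key-view comparison, one value loop (objective: alternative, same asymptotic cost).

-- ===== PORT A =====
-- Python dict over an association list: keys view / first-match lookup
def pvEntKeys (e : List (String × String)) : List String := e.map Prod.fst
def pvEntGet? (e : List (String × String)) (k : String) : Option String := List.lookup k e

def pvPairA (e1 e2 : List (String × String)) : Bool :=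
  ((pvEntKeys e1).all (fun k =>
      if (pvEntKeys e2).contains k then pvEntGet? e1 k == pvEntGet? e2 k else false))
  && ((pvEntKeys e2).all (fun k => (pvEntKeys e1).contains k))

def pvALoop (d1 d2 : List (List (String × String))) :
    List (Int × List (String × String)) → Bool
  | [] => true
  | (idx, _ent) :: rest =>
    -- e1 = d1[idx]; e2 = d2[idx] (idx from enumerate(d1), in range; none = IndexError, unreachable)
    match PySem.List.pyGet? d1 idx, PySem.List.pyGet? d2 idx with
    | some e1, some e2 => if pvPairA e1 e2 then pvALoop d1 d2 rest else false
    | _, _ => false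

def ents_match (d1 : List (List (String × String))) (d2 : List (List (String × String))) (path : String) : Bool :=
  if d1.length ≠ d2.length then false
  else pvALoop d1 d2 (PySem.List.enumerate d1 0)

-- ===== PORT B =====
-- f = {(i, k): v for i, e in enumerate(d) for k, v in e.items()}
def pvFlat (d : List (List (String × String))) : PySem.Dict (Int × String) String :=
  (PySem.List.enumerate d 0).foldl
    (fun f ie => ie.2.foldl (fun f kv => f.insert (ie.1, kv.1) kv.2) f)
    PySem.Dict.empty

def ents_match_alt (d1 : List (List (String × String))) (d2 : List (List (String × String))) (path : String) : Bool :=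
  if d1.length ≠ d2.length then false
  else
    let f1 := pvFlat d1
    let f2 := pvFlat d2
    -- f1.keys() != f2.keys(): dict key views compare as sets
    if ¬ (PySem.Set.equal (PySem.Set.ofList f1.keys) (PySem.Set.ofList f2.keys)) then false
    else
      -- for p in f1: if f1[p] != f2[p]: return False  (p ∈ f2 is guaranteed by the key check)
      f1.keys.all (fun p => f1.get? p == f2.get? p)

-- ===== PRECONDITION & SPEC =====
-- Pre_ excludes inputs in which some inner association list repeats a key: such lists represent
-- no Python dict (dict keys are unique), so no actual Python input is excluded; A's first-match
-- behaviour on them is an artefact of the association-list model only.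
def Pre_ents_match (d1 : List (List (String × String))) (d2 : List (List (String × String))) (path : String) : Prop :=
  (∀ e ∈ d1, (e.map Prod.fst).Nodup) ∧ (∀ e ∈ d2, (e.map Prod.fst).Nodup)
instance (d1 : List (List (String × String))) (d2 : List (List (String × String))) (path : String) : Decidable (Pre_ents_match d1 d2 path) := by unfold Pre_ents_match; infer_instance

def pvWitness_ents_match : (List (List (String × String))) × (List (List (String × String))) × String :=
  ([[("classname", "light"), ("origin", "0 0 0")]], [[("origin", "0 0 0"), ("classname", "light")]], "maps/a.map")

def Spec_ents_match (d1 : List (List (String × String))) (d2 : List (List (String × String))) (path : String) (out : Bool) : Prop := out = ents_match_alt d1 d2 path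
instance (d1 : List (List (String × String))) (d2 : List (List (String × String))) (path : String) (out : Bool) : Decidable (Spec_ents_match d1 d2 path out) := by unfold Spec_ents_match; infer_instance

-- ===== CLAIM (what is proved, stated in full; the proofs are below) =====
def Claim_equal_ents_match : Prop := ∀ (d1 : List (List (String × String))) (d2 : List (List (String × String))) (path : String), Dom_ents_match d1 d2 path → Pre_ents_match d1 d2 path → Spec_ents_match d1 d2 path (ents_match d1 d2 path)

-- ===== LEMMAS AND PROOFS =====

-- the items of pvFlat d, written directly: each entry tagged with its index
def pvTag (s : Int) (e : List (String × String)) : List ((Int × String) × String) :=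
  e.map (fun kv => ((s, kv.1), kv.2))

def pvItems (d : List (List (String × String))) (s : Int) : List ((Int × String) × String) :=
  (PySem.List.enumerate d s).flatMap (fun ie => pvTag ie.1 ie.2)

lemma pvFlat_items_aux (d : List (List (String × String))) :
    ∀ (s : Int) (f : PySem.Dict (Int × String) String),
      (∀ e ∈ d, (e.map Prod.fst).Nodup) →
      (∀ p ∈ f.keys, p.1 < s) → f.keys.Nodup →
      ((PySem.List.enumerate d s).foldl
          (fun f ie => ie.2.foldl (fun f kv => f.insert (ie.1, kv.1) kv.2) f) f).items
        = f.items ++ pvItems d s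
      ∧ ((PySem.List.enumerate d s).foldl
          (fun f ie => ie.2.foldl (fun f kv => f.insert (ie.1, kv.1) kv.2) f) f).keys.Nodup := by
  induction d with
  | nil => intro s f _ _ hnd; simp [pvItems, PySem.List.enumerate_nil]; exact hnd
  | cons e d ih =>
    intro s f hnod hlt hnd
    rw [PySem.List.enumerate_cons]
    simp only [List.foldl_cons]
    set f' := e.foldl (fun f kv => f.insert (s, kv.1) kv.2) f with hf'
    have hkey : (e.map (fun a => (s, a.1))).Nodup := by
      have : e.map (fun a => (s, a.1)) = (e.map Prod.fst).map (fun k => (s, k)) := by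
        simp [List.map_map]
      rw [this]
      exact (hnod e (by simp)).map (fun a b hab => by simpa using hab)
    have hfresh : ∀ a ∈ e, f.contains (s, a.1) = false := by
      intro a _
      rw [Bool.eq_false_iff]
      intro hc
      have := hlt _ ((PySem.Dict.contains_iff_mem_keys f _).mp hc)
      simp at this
    have hitems : f'.items = f.items ++ e.map (fun a => ((s, a.1), a.2)) := by
      exact PySem.Dict.items_foldl_insert_fresh e (fun a => (s, a.1)) (fun a => a.2) f hfresh hkey
    have hkeys : f'.keys = f.keys ++ e.map (fun a => (s, a.1)) := by
      simp only [PySem.Dict.keys, hitems, List.map_append, List.map_map]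
      rfl
    have hlt' : ∀ p ∈ f'.keys, p.1 < s + 1 := by
      intro p hp
      rw [hkeys, List.mem_append] at hp
      rcases hp with hp | hp
      · have := hlt p hp; omega
      · simp only [List.mem_map] at hp
        obtain ⟨a, _, rfl⟩ := hp; simp
    have hnd' : f'.keys.Nodup := by
      rw [hkeys]
      refine List.Nodup.append hnd hkey ?_
      intro p hp hp'
      have := hlt p hp
      simp only [List.mem_map] at hp'
      obtain ⟨a, _, rfl⟩ := hp'
      simp at this
    obtain ⟨hi, hn⟩ := ih (s + 1) f' (fun e he => hnod e (by simp [he])) hlt' hnd'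
    refine ⟨?_, hn⟩
    rw [hi, hitems]
    simp [pvItems, PySem.List.enumerate_cons, pvTag, List.flatMap_cons, List.append_assoc]

lemma pvFlat_items (d : List (List (String × String))) (h : ∀ e ∈ d, (e.map Prod.fst).Nodup) :
    (pvFlat d).items = pvItems d 0 := by
  have := (pvFlat_items_aux d 0 PySem.Dict.empty h (by simp [PySem.Dict.keys_empty]) (by simp [PySem.Dict.keys_empty])).1
  simpa [pvFlat, PySem.Dict.items] using this

lemma pvFlat_nodup_keys (d : List (List (String × String))) (h : ∀ e ∈ d, (e.map Prod.fst).Nodup) :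
    (pvFlat d).keys.Nodup :=
  (pvFlat_items_aux d 0 PySem.Dict.empty h (by simp [PySem.Dict.keys_empty]) (by simp [PySem.Dict.keys_empty])).2

lemma mem_keys_pvFlat (d : List (List (String × String))) (h : ∀ e ∈ d, (e.map Prod.fst).Nodup)
    (i : Int) (k : String) :
    (i, k) ∈ (pvFlat d).keys ↔ ∃ (n : Nat) (_ : n < d.length), i = n ∧ k ∈ (d[n].map Prod.fst) := by
  rw [PySem.Dict.keys, pvFlat_items d h]
  simp only [pvItems, pvTag, List.map_flatMap, List.mem_flatMap, List.map_map,
    PySem.List.mem_enumerate_iff, List.mem_map]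
  constructor
  · rintro ⟨ie, ⟨n, hn, rfl⟩, a, ha, hik⟩
    simp only [Function.comp, Prod.mk.injEq] at hik
    obtain ⟨h1, h2⟩ := hik
    exact ⟨n, hn, by omega, a, by simpa using ha, h2⟩
  · rintro ⟨n, hn, rfl, a, ha, rfl⟩
    exact ⟨(0 + (n : Int), d[n]), ⟨n, hn, rfl⟩, a, ha, by simp [Function.comp]⟩

lemma get?_pvFlat (d : List (List (String × String))) (h : ∀ e ∈ d, (e.map Prod.fst).Nodup)
    (n : Nat) (hn : n < d.length) (k : String) :
    (pvFlat d).get? ((n : Int), k) = List.lookup k d[n] := by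
  cases hl : List.lookup k d[n] with
  | some v =>
      have hmem : (k, v) ∈ d[n] := by
        obtain ⟨l1, l2, heq, -⟩ := List.lookup_eq_some_iff.mp hl
        rw [heq]; simp
      have hitem : (((n : Int), k), v) ∈ (pvFlat d).items := by
        rw [pvFlat_items d h]
        simp only [pvItems, List.mem_flatMap, PySem.List.mem_enumerate_iff]
        exact ⟨(0 + (n : Int), d[n]), ⟨n, hn, rfl⟩, by
          simp only [pvTag, List.mem_map]
          exact ⟨(k, v), hmem, by simp⟩⟩
      exact PySem.Dict.get?_of_mem_items _ hitem (pvFlat_nodup_keys d h)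
  | none =>
      rw [PySem.Dict.get?_eq_none_iff_not_mem_keys]
      rw [mem_keys_pvFlat d h]
      rintro ⟨m, hm, hnm, hk⟩
      have : m = n := by omega
      subst this
      obtain ⟨a, ha, rfl⟩ := List.mem_map.mp hk
      have := List.lookup_eq_none_iff.mp hl a ha
      simp at this

lemma pvPairA_iff (e1 e2 : List (String × String)) :
    pvPairA e1 e2 = true ↔
      (∀ k ∈ e1.map Prod.fst, k ∈ e2.map Prod.fst ∧ List.lookup k e1 = List.lookup k e2) ∧
      (∀ k ∈ e2.map Prod.fst, k ∈ e1.map Prod.fst) := by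
  simp only [pvPairA, pvEntKeys, pvEntGet?, Bool.and_eq_true, List.all_eq_true]
  constructor
  · rintro ⟨h1, h2⟩
    refine ⟨fun k hk => ?_, fun k hk => by simpa using h2 k hk⟩
    have := h1 k hk
    by_cases hc : k ∈ e2.map Prod.fst
    · rw [if_pos (by simpa using hc)] at this
      exact ⟨hc, by simpa using this⟩
    · rw [if_neg (by simpa using hc)] at this
      simp at this
  · rintro ⟨h1, h2⟩
    refine ⟨fun k hk => ?_, fun k hk => by simpa using h2 k hk⟩
    obtain ⟨hm, hv⟩ := h1 k hk
    rw [if_pos (by simpa using hm)]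
    simpa using hv

lemma zip_all_iff (d1 d2 : List (List (String × String))) (hlen : d1.length = d2.length) :
    ((d1.zip d2).all (fun p => pvPairA p.1 p.2) = true) ↔
      ∀ (n : Nat) (h : n < d1.length), pvPairA d1[n] (d2[n]'(hlen ▸ h)) = true := by
  rw [List.all_eq_true]
  constructor
  · intro h n hn
    exact h (d1[n], d2[n]'(hlen ▸ hn)) (by
      have : (d1.zip d2)[n]'(by simp [List.length_zip]; omega) = (d1[n], d2[n]'(hlen ▸ hn)) := by
        simp [List.getElem_zip]
      exact this ▸ List.getElem_mem _)
  · intro h p hp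
    obtain ⟨n, hn, rfl⟩ := List.getElem_of_mem hp
    have hn1 : n < d1.length := by simp [List.length_zip] at hn; omega
    simpa [List.getElem_zip] using h n hn1

lemma pvMain (d1 d2 : List (List (String × String))) (hlen : d1.length = d2.length)
    (h1 : ∀ e ∈ d1, (e.map Prod.fst).Nodup) (h2 : ∀ e ∈ d2, (e.map Prod.fst).Nodup) :
    (d1.zip d2).all (fun p => pvPairA p.1 p.2) =
      (if ¬ (PySem.Set.equal (PySem.Set.ofList (pvFlat d1).keys) (PySem.Set.ofList (pvFlat d2).keys)) then false
       else (pvFlat d1).keys.all (fun p => (pvFlat d1).get? p == (pvFlat d2).get? p)) := by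
  rw [Bool.eq_iff_iff, zip_all_iff d1 d2 hlen]
  constructor
  · intro hall
    have hkeys : ∀ i k, ((i, k) ∈ (pvFlat d1).keys ↔ (i, k) ∈ (pvFlat d2).keys) := by
      intro i k
      rw [mem_keys_pvFlat d1 h1, mem_keys_pvFlat d2 h2]
      constructor
      · rintro ⟨n, hn, rfl, hk⟩
        exact ⟨n, hlen ▸ hn, rfl, ((pvPairA_iff _ _).mp (hall n hn)).1 k hk |>.1⟩
      · rintro ⟨n, hn, rfl, hk⟩
        have hn1 : n < d1.length := by omega
        exact ⟨n, hn1, rfl, ((pvPairA_iff _ _).mp (hall n hn1)).2 k hk⟩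
    have hEq : PySem.Set.equal (PySem.Set.ofList (pvFlat d1).keys) (PySem.Set.ofList (pvFlat d2).keys) = true := by
      rw [PySem.Set.equal_iff]
      rintro ⟨i, k⟩
      simpa [PySem.Set.mem_ofList] using hkeys i k
    rw [if_neg (by simp [hEq])]
    rw [List.all_eq_true]
    rintro ⟨i, k⟩ hp
    obtain ⟨n, hn, rfl, hk⟩ := (mem_keys_pvFlat d1 h1 i k).mp hp
    rw [beq_iff_eq, get?_pvFlat d1 h1 n hn, get?_pvFlat d2 h2 n (hlen ▸ hn)]
    exact ((pvPairA_iff _ _).mp (hall n hn)).1 k hk |>.2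
  · intro hB n hn
    by_cases hEq : PySem.Set.equal (PySem.Set.ofList (pvFlat d1).keys) (PySem.Set.ofList (pvFlat d2).keys) = true
    · rw [if_neg (by simp [hEq]), List.all_eq_true] at hB
      have hks := (PySem.Set.equal_iff _ _).mp hEq
      rw [pvPairA_iff]
      constructor
      · intro k hk
        have hm1 : ((n : Int), k) ∈ (pvFlat d1).keys :=
          (mem_keys_pvFlat d1 h1 _ k).mpr ⟨n, hn, rfl, hk⟩
        have hm2 : ((n : Int), k) ∈ (pvFlat d2).keys := by
          have := (hks ((n : Int), k)).mp (by simpa [PySem.Set.mem_ofList] using hm1)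
          simpa [PySem.Set.mem_ofList] using this
        obtain ⟨m, hm, hnm, hk2⟩ := (mem_keys_pvFlat d2 h2 _ k).mp hm2
        obtain rfl : n = m := by omega
        refine ⟨hk2, ?_⟩
        have := hB _ hm1
        rw [beq_iff_eq, get?_pvFlat d1 h1 n hn, get?_pvFlat d2 h2 n (hlen ▸ hn)] at this
        exact this
      · intro k hk
        have hm2 : ((n : Int), k) ∈ (pvFlat d2).keys :=
          (mem_keys_pvFlat d2 h2 _ k).mpr ⟨n, hlen ▸ hn, rfl, hk⟩
        have hm1 : ((n : Int), k) ∈ (pvFlat d1).keys := by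
          have := (hks ((n : Int), k)).mpr (by simpa [PySem.Set.mem_ofList] using hm2)
          simpa [PySem.Set.mem_ofList] using this
        obtain ⟨m, hm, hnm, hk1⟩ := (mem_keys_pvFlat d1 h1 _ k).mp hm1
        obtain rfl : n = m := by omega
        exact hk1
    · rw [if_pos (by simpa using hEq)] at hB
      simp at hB

lemma pvALoop_eq (d1 d2 : List (List (String × String))) (hlen : d1.length = d2.length) :
    ∀ m n, d1.length - n = m →
      pvALoop d1 d2 (PySem.List.enumerate (d1.drop n) n) =
        ((d1.drop n).zip (d2.drop n)).all (fun p => pvPairA p.1 p.2) := by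
  intro m
  induction m with
  | zero =>
      intro n hn
      have h1 : d1.drop n = [] := by
        apply List.drop_eq_nil_of_le; omega
      rw [h1]
      simp [pvALoop, PySem.List.enumerate]
  | succ m ih =>
      intro n hn
      have hlt : n < d1.length := by omega
      have hlt2 : n < d2.length := by omega
      have hrec := ih (n + 1) (by omega)
      have hcast : ((n + 1 : Nat) : Int) = (n : Int) + 1 := by push_cast; ring
      rw [hcast] at hrec
      rw [List.drop_eq_getElem_cons hlt, List.drop_eq_getElem_cons hlt2,
        PySem.List.enumerate_cons]
      have hg1 : PySem.List.pyGet? d1 ((n : Int)) = some d1[n] := by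
        rw [PySem.List.pyGet?_natCast]; simp [hlt]
      have hg2 : PySem.List.pyGet? d2 ((n : Int)) = some d2[n] := by
        rw [PySem.List.pyGet?_natCast]; simp [hlt2]
      simp only [pvALoop, hg1, hg2, List.zip_cons_cons, List.all_cons]
      cases hpa : pvPairA (d1[n]'hlt) (d2[n]'hlt2) <;> simp_all

-- ===== VERDICT (by name: the statement is the Claim_ definition above) =====
theorem ents_match_spec : Claim_equal_ents_match := by
  intro d1 d2 path _dom hpre
  obtain ⟨h1, h2⟩ := hpre
  unfold Spec_ents_match ents_match ents_match_alt
  by_cases h : d1.length = d2.length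
  · rw [if_neg (by omega), if_neg (by omega)]
    have hA := pvALoop_eq d1 d2 h (d1.length - 0) 0 rfl
    simp only [List.drop_zero, Nat.cast_zero] at hA
    rw [hA]
    exact pvMain d1 d2 h h1 h2
  · rw [if_pos h, if_pos h]
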